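-- pv_equiv track=rewrite | github.com/MingyuKIM615/Programmers_Code_Test_Level1 | 모의고사.py | solution
-- ===== SOURCE A (Python) =====
-- def solution(answers):
--     answer = []
--
--     p1 = [1,2,3,4,5]
--     p2 = [2,1,2,3,2,4,2,5]
--     p3 = [3,3,1,1,2,2,4,4,5,5]
--
--     c1 = 0
--     c2 = 0
--     c3 = 0
--
--     for i in range(len(answers)):
--         s1 = i % 5
--         s2 = i % 8
--         s3 = i % 10
--
--
--         if p1[s1] == answers[i]:
--             c1 +=1;
--         if p2[s2] == answers[i]:
--             c2 +=1;
--         if p3[s3] == answers[i]: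
--             c3 +=1;
--
--     m = max(c1, c2, c3)
--
--     if m == c1:
--         answer.append(1)
--     if m == c2:
--         answer.append(2)
--     if m == c3:
--         answer.append(3)
--
--     return answer
-- ===== SOURCE B (Python) =====
-- def solution(answers):
--     def score(p, xs):
--         # walk xs one pattern-length block at a time, zipping each block against p
--         s = 0
--         i = 0
--         while i < len(xs):
--             s += sum(a == b for a, b in zip(p, xs[i:i + len(p)]))
--             i += len(p)
--         return s
--
--     patterns = [[1, 2, 3, 4, 5],
--                 [2, 1, 2, 3, 2, 4, 2, 5],
--                 [3, 3, 1, 1, 2, 2, 4, 4, 5, 5]]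
--     scores = [score(p, answers) for p in patterns]
--     m = max(scores)
--     return [k for k in (1, 2, 3) if scores[k - 1] == m]
-- ===== Notes on version B (the rewrite author's own statement) =====
-- stated objective: alternative
-- what changed: A's single index loop that interleaves three modulo-indexed counters is replaced by a per-pattern chunked traversal: the answers are cut into pattern-length blocks, each block is zipped directly against the pattern (no modulo arithmetic), and the winners are read off by filtering the answerer numbers against the maximal score.
import Mathlib
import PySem

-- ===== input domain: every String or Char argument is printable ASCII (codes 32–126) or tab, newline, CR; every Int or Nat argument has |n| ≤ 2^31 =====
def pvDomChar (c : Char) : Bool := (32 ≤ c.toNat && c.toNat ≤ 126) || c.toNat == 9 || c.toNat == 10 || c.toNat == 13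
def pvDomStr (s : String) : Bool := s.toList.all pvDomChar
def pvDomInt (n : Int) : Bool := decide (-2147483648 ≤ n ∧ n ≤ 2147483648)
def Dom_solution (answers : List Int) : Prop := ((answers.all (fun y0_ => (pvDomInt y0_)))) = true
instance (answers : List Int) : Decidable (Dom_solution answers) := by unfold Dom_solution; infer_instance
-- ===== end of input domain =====

-- B replaces A's single index-and-modulo loop by a chunked traversal: each
-- pattern's score is obtained by cutting the answers into pattern-length blocks
-- and zipping each block against the pattern; objective: alternative, same O(n).

-- ===== PORT A =====
-- one interleaved loop over the indices, carrying the three counters as a triple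
def solution (answers : List Int) : List Int :=
  let answer : List Int := []
  let p1 : List Int := [1, 2, 3, 4, 5]
  let p2 : List Int := [2, 1, 2, 3, 2, 4, 2, 5]
  let p3 : List Int := [3, 3, 1, 1, 2, 2, 4, 4, 5, 5]
  let cs :=
    (PySem.List.pyRange 0 (answers.length : Int) 1).foldl
      (fun (c : Int × Int × Int) i =>
        let s1 := PySem.Int.mod i 5
        let s2 := PySem.Int.mod i 8
        let s3 := PySem.Int.mod i 10
        -- indices are in range, so pyGetD is exact for answers[i], p1[s1], p2[s2], p3[s3]
        let ai := PySem.List.pyGetD answers i 0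
        (if PySem.List.pyGetD p1 s1 0 = ai then c.1 + 1 else c.1,
         if PySem.List.pyGetD p2 s2 0 = ai then c.2.1 + 1 else c.2.1,
         if PySem.List.pyGetD p3 s3 0 = ai then c.2.2 + 1 else c.2.2))
      (0, 0, 0)
  let m := max cs.1 (max cs.2.1 cs.2.2)
  let answer := if m = cs.1 then answer ++ [1] else answer
  let answer := if m = cs.2.1 then answer ++ [2] else answer
  let answer := if m = cs.2.2 then answer ++ [3] else answer
  answer

-- ===== PORT B =====
-- the 'while i < len(xs):' loop of Source B's score, with a fuel argument only to
-- make the recursion total (for the nonempty patterns it is exactly the Python loop)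
def pvScoreAux (p : List Int) (xs : List Int) : Nat → Nat → Int → Int
  | 0, _, s => s
  | fuel + 1, i, s =>
      if (i : Int) < (xs.length : Int) then
        -- s += sum(a == b for a, b in zip(p, xs[i:i+len(p)])); i += len(p)
        pvScoreAux p xs fuel (i + p.length)
          (s + ((p.zip (PySem.List.slice xs (some (i : Int)) (some ((i : Int) + (p.length : Int))))).map
                  (fun ab => if ab.1 = ab.2 then (1 : Int) else 0)).sum)
      else s

def pvScore (p : List Int) (xs : List Int) : Int := pvScoreAux p xs (xs.length + 1) 0 0

def solution_alt (answers : List Int) : List Int :=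
  let patterns : List (List Int) :=
    [[1, 2, 3, 4, 5], [2, 1, 2, 3, 2, 4, 2, 5], [3, 3, 1, 1, 2, 2, 4, 4, 5, 5]]
  let scores := patterns.map (fun p => pvScore p answers)
  -- max(scores): scores always has three elements, so max? is some
  let m := (PySem.List.max? scores id).getD 0
  ([1, 2, 3] : List Int).filter (fun k => PySem.List.pyGetD scores (k - 1) 0 = m)

-- ===== PRECONDITION & SPEC =====
def Spec_solution (answers : List Int) (out : List Int) : Prop := out = solution_alt answers
instance (answers : List Int) (out : List Int) : Decidable (Spec_solution answers out) := by unfold Spec_solution; infer_instance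

-- ===== CLAIM (what is proved, stated in full; the proofs are below) =====
def Claim_equal_solution : Prop := ∀ (answers : List Int), Dom_solution answers → Spec_solution answers (solution answers)

-- ===== LEMMAS AND PROOFS =====

-- common characterisation of one pattern's score: structural count with a cycling index
def pvAcnt (p : List Int) : Nat → List Int → Int
  | _, [] => 0
  | k, a :: xs =>
      (if PySem.List.pyGetD p ((k % p.length : Nat) : Int) 0 = a then (1 : Int) else 0)
        + pvAcnt p (k + 1) xs

-- the interleaved triple-counter fold splits into three independent 0/1 sums
theorem pv_foldl_triple {α : Type} (q1 q2 q3 : α → Prop)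
    [DecidablePred q1] [DecidablePred q2] [DecidablePred q3]
    (L : List α) (c1 c2 c3 : Int) :
    L.foldl
      (fun (c : Int × Int × Int) x =>
        (if q1 x then c.1 + 1 else c.1,
         if q2 x then c.2.1 + 1 else c.2.1,
         if q3 x then c.2.2 + 1 else c.2.2))
      (c1, c2, c3)
    = (c1 + (L.map (fun x => if q1 x then (1 : Int) else 0)).sum,
       c2 + (L.map (fun x => if q2 x then (1 : Int) else 0)).sum,
       c3 + (L.map (fun x => if q3 x then (1 : Int) else 0)).sum) := by
  induction L generalizing c1 c2 c3 with
  | nil => simp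
  | cons x xs ih =>
      simp only [List.foldl_cons, List.map_cons, List.sum_cons, ih]
      split_ifs <;> simp [add_assoc]

-- A's indexed 0/1 sum over range(len(answers)) is the cycling structural count
theorem pv_sum_eq_acnt (p : List Int) (xs : List Int) (k : Nat) :
    ((PySem.List.enumerate xs (k : Int)).map
      (fun jx => if PySem.List.pyGetD p (PySem.Int.mod jx.1 (p.length : Int)) 0 = jx.2
                 then (1 : Int) else 0)).sum = pvAcnt p k xs := by
  induction xs generalizing k with
  | nil => simp [PySem.List.enumerate_nil, pvAcnt]
  | cons a xs ih =>
      rw [PySem.List.enumerate_cons]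
      have hk1 : ((k : Int) + 1) = ((k + 1 : Nat) : Int) := by push_cast; ring
      simp only [List.map_cons, List.sum_cons, hk1, ih, pvAcnt,
        PySem.Int.mod_natCast]

-- the cycling count only depends on the index modulo the pattern length
theorem pv_acnt_period (p : List Int) (xs : List Int) (k : Nat) :
    pvAcnt p (k + p.length) xs = pvAcnt p k xs := by
  induction xs generalizing k with
  | nil => rfl
  | cons a xs ih =>
      simp only [pvAcnt, Nat.add_mod_right]
      have : k + p.length + 1 = (k + 1) + p.length := by omega
      rw [this, ih]

-- one chunk: from offset k (≤ len p) the count is the zip against p.drop k,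
-- then the count from offset len p on the rest
theorem pv_acnt_chunk (p : List Int) (xs : List Int) (k : Nat) (hk : k ≤ p.length) :
    pvAcnt p k xs
      = (((p.drop k).zip xs).map (fun ab => if ab.1 = ab.2 then (1 : Int) else 0)).sum
        + pvAcnt p p.length (xs.drop (p.length - k)) := by
  induction xs generalizing k with
  | nil => simp [pvAcnt]
  | cons a xs ih =>
      rcases Nat.lt_or_eq_of_le hk with hlt | heq
      · rw [List.drop_eq_getElem_cons hlt]
        have hdrop : (a :: xs).drop (p.length - k) = xs.drop (p.length - (k + 1)) := by
          have : p.length - k = (p.length - (k + 1)) + 1 := by omega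
          rw [this, List.drop_succ_cons]
        have hmod : k % p.length = k := Nat.mod_eq_of_lt hlt
        have hget : PySem.List.pyGetD p ((k : Nat) : Int) 0 = p[k] := by
          rw [PySem.List.pyGetD_natCast]
          exact List.getD_eq_getElem p 0 hlt
        simp only [pvAcnt, hmod, hget, List.zip_cons_cons, List.map_cons,
          List.sum_cons, hdrop, ih (k + 1) hlt]
        ring
      · subst heq
        simp [pvAcnt, List.drop_length]

theorem pv_acnt_step (p : List Int) (xs : List Int) :
    pvAcnt p 0 xs
      = ((p.zip xs).map (fun ab => if ab.1 = ab.2 then (1 : Int) else 0)).sum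
        + pvAcnt p 0 (xs.drop p.length) := by
  have h := pv_acnt_chunk p xs 0 (Nat.zero_le _)
  have hper : pvAcnt p p.length (xs.drop p.length) = pvAcnt p 0 (xs.drop p.length) := by
    have := pv_acnt_period p (xs.drop p.length) 0
    simpa using this
  simpa [hper] using h

-- zip against p only sees the first (len p) elements
theorem pv_zip_take {α β : Type} (p : List α) (ys : List β) :
    p.zip (ys.take p.length) = p.zip ys := by
  induction p generalizing ys with
  | nil => simp
  | cons a p ih =>
      cases ys with
      | nil => simp
      | cons b ys => simp [ih]

-- Source B's while-loop computes the cycling structural count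
theorem pv_scoreAux_eq (p : List Int) (hp : p ≠ []) (xs : List Int) (fuel : Nat) :
    ∀ (i : Nat) (s : Int), xs.length ≤ i + fuel →
      pvScoreAux p xs fuel i s = s + pvAcnt p 0 (xs.drop i) := by
  induction fuel with
  | zero =>
      intro i s h
      rw [List.drop_eq_nil_of_le (by omega)]
      simp [pvScoreAux, pvAcnt]
  | succ fuel ih =>
      intro i s h
      have hL : 0 < p.length := List.length_pos_of_ne_nil hp
      rw [pvScoreAux]
      by_cases hi : (i : Int) < (xs.length : Int)
      · rw [if_pos hi, PySem.List.slice_natCast_add, pv_zip_take,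
            ih (i + p.length) _ (by omega)]
        have hd : xs.drop (i + p.length) = (xs.drop i).drop p.length := by
          rw [List.drop_drop]
        rw [hd, pv_acnt_step p (xs.drop i)]
        ring
      · rw [if_neg hi]
        have : xs.length ≤ i := by exact_mod_cast Int.not_lt.mp hi
        rw [List.drop_eq_nil_of_le this]
        simp [pvAcnt]

theorem pv_score_eq (p : List Int) (hp : p ≠ []) (xs : List Int) :
    pvScore p xs = pvAcnt p 0 xs := by
  have := pv_scoreAux_eq p hp xs (xs.length + 1) 0 0 (by omega)
  simpa [pvScore] using this

-- the tie-handling tails agree: A's three appends vs B's filter of the answerer numbers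
theorem pv_tails (s1 s2 s3 : Int) :
    (let m := max s1 (max s2 s3)
     let a1 := if m = s1 then ([] : List Int) ++ [1] else []
     let a2 := if m = s2 then a1 ++ [2] else a1
     (if m = s3 then a2 ++ [3] else a2))
    = ([1, 2, 3] : List Int).filter
        (fun k => PySem.List.pyGetD [s1, s2, s3] (k - 1) 0
                    = (PySem.List.max? [s1, s2, s3] id).getD 0) := by
  have hm : (PySem.List.max? [s1, s2, s3] id).getD 0 = max s1 (max s2 s3) := by
    simp only [PySem.List.max?, List.foldl_cons, List.foldl_nil, id_eq]
    by_cases h12 : s1 < s2 <;> simp only [h12, if_true, if_false] <;>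
    [ (by_cases h3 : s2 < s3); (by_cases h3 : s1 < s3) ] <;> simp [h3, max_def] <;> omega
  rw [hm]
  have h4 : max s1 (max s2 s3) = s1 ∨ max s1 (max s2 s3) = s2 ∨ max s1 (max s2 s3) = s3 := by
    rcases max_choice s1 (max s2 s3) with h | h
    · exact Or.inl h
    · rcases max_choice s2 s3 with h' | h'
      · exact Or.inr (Or.inl (h.trans h'))
      · exact Or.inr (Or.inr (h.trans h'))
  generalize max s1 (max s2 s3) = m at h4 ⊢
  have g0 : PySem.List.pyGetD [s1, s2, s3] ((1 : Int) - 1) 0 = s1 := by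
    have h : ((1 : Int) - 1) = ((0 : Nat) : Int) := by norm_num
    rw [h, PySem.List.pyGetD_natCast]; rfl
  have g1 : PySem.List.pyGetD [s1, s2, s3] ((2 : Int) - 1) 0 = s2 := by
    have h : ((2 : Int) - 1) = ((1 : Nat) : Int) := by norm_num
    rw [h, PySem.List.pyGetD_natCast]; rfl
  have g2 : PySem.List.pyGetD [s1, s2, s3] ((3 : Int) - 1) 0 = s3 := by
    have h : ((3 : Int) - 1) = ((2 : Nat) : Int) := by norm_num
    rw [h, PySem.List.pyGetD_natCast]; rfl
  simp only [List.filter_cons, List.filter_nil, decide_eq_true_eq]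
  rw [g0, g1, g2]
  clear hm g0 g1 g2
  split_ifs <;> first | rfl | (exfalso; omega)

-- A's per-pattern 0/1 sum over range(len(xs)) equals the cycling count
theorem pv_range_sum (p : List Int) (xs : List Int) :
    ((PySem.List.pyRange 0 (xs.length : Int) 1).map
      (fun i => if PySem.List.pyGetD p (PySem.Int.mod i (p.length : Int)) 0
                    = PySem.List.pyGetD xs i 0 then (1 : Int) else 0)).sum
      = pvAcnt p 0 xs := by
  have h := pv_sum_eq_acnt p xs 0
  rw [Nat.cast_zero] at h
  rw [← h, PySem.List.enumerate_eq_map_pyRange (d := 0), List.map_map]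
  rfl

theorem pv_range_sum1 (xs : List Int) :
    ((PySem.List.pyRange 0 (xs.length : Int) 1).map
      (fun i => if PySem.List.pyGetD [1, 2, 3, 4, 5] (PySem.Int.mod i 5) 0
                    = PySem.List.pyGetD xs i 0 then (1 : Int) else 0)).sum
      = pvAcnt [1, 2, 3, 4, 5] 0 xs := by
  exact pv_range_sum [1, 2, 3, 4, 5] xs

theorem pv_range_sum2 (xs : List Int) :
    ((PySem.List.pyRange 0 (xs.length : Int) 1).map
      (fun i => if PySem.List.pyGetD [2, 1, 2, 3, 2, 4, 2, 5] (PySem.Int.mod i 8) 0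
                    = PySem.List.pyGetD xs i 0 then (1 : Int) else 0)).sum
      = pvAcnt [2, 1, 2, 3, 2, 4, 2, 5] 0 xs := by
  exact pv_range_sum [2, 1, 2, 3, 2, 4, 2, 5] xs

theorem pv_range_sum3 (xs : List Int) :
    ((PySem.List.pyRange 0 (xs.length : Int) 1).map
      (fun i => if PySem.List.pyGetD [3, 3, 1, 1, 2, 2, 4, 4, 5, 5] (PySem.Int.mod i 10) 0
                    = PySem.List.pyGetD xs i 0 then (1 : Int) else 0)).sum
      = pvAcnt [3, 3, 1, 1, 2, 2, 4, 4, 5, 5] 0 xs := by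
  exact pv_range_sum [3, 3, 1, 1, 2, 2, 4, 4, 5, 5] xs

-- ===== VERDICT (by name: the statement is the Claim_ definition above) =====
theorem solution_spec : Claim_equal_solution := by
  intro answers _
  unfold Spec_solution
  show solution answers = solution_alt answers
  unfold solution solution_alt
  simp only [List.map_cons, List.map_nil]
  have e1 := pv_range_sum1 answers
  have e2 := pv_range_sum2 answers
  have e3 := pv_range_sum3 answers
  have f1 : pvScore [1, 2, 3, 4, 5] answers = pvAcnt [1, 2, 3, 4, 5] 0 answers :=
    pv_score_eq _ (by simp) _
  have f2 : pvScore [2, 1, 2, 3, 2, 4, 2, 5] answers = pvAcnt [2, 1, 2, 3, 2, 4, 2, 5] 0 answers :=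
    pv_score_eq _ (by simp) _
  have f3 : pvScore [3, 3, 1, 1, 2, 2, 4, 4, 5, 5] answers = pvAcnt [3, 3, 1, 1, 2, 2, 4, 4, 5, 5] 0 answers :=
    pv_score_eq _ (by simp) _
  simp only [f1, f2, f3,
    pv_foldl_triple
      (fun i => PySem.List.pyGetD [1, 2, 3, 4, 5] (PySem.Int.mod i 5) 0 = PySem.List.pyGetD answers i 0)
      (fun i => PySem.List.pyGetD [2, 1, 2, 3, 2, 4, 2, 5] (PySem.Int.mod i 8) 0 = PySem.List.pyGetD answers i 0)
      (fun i => PySem.List.pyGetD [3, 3, 1, 1, 2, 2, 4, 4, 5, 5] (PySem.Int.mod i 10) 0 = PySem.List.pyGetD answers i 0)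
      (PySem.List.pyRange 0 (answers.length : Int) 1) 0 0 0,
    zero_add, e1, e2, e3]
  exact pv_tails _ _ _
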